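-- pv_equiv track=rewrite | github.com/Sayeem2004/CodingBat | Python/p244768.py | specialSumExclusive
-- ===== SOURCE A (Python) =====
-- def specialSumExclusive(n):
--   s = 0
--   i = 0
--   while i <= n:
--     if i % 35 == 0:
--       s = s + i
--     i = i + 1
--   return s
-- ===== SOURCE B (Python) =====
-- def specialSumExclusive(n):
--     if n < 0:
--         return 0
--     k = n // 35
--     return 35 * k * (k + 1) // 2
-- ===== Notes on version B (the rewrite author's own statement) =====
-- stated objective: faster
-- what changed: Replaces the O(n) loop over 0..n with the closed-form arithmetic-series formula 35*k*(k+1)//2 where k = n//35.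
import Mathlib
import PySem

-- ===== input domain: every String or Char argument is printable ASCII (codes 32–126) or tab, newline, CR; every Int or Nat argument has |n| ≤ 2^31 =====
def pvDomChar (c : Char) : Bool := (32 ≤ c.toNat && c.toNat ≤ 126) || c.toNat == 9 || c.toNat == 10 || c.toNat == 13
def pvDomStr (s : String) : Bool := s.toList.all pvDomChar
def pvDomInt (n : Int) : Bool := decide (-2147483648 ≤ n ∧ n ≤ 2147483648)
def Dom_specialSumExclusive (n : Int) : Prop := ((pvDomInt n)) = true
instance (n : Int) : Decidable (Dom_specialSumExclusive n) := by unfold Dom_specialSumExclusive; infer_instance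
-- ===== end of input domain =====

-- B replaces A's O(n) loop with the closed-form arithmetic series 35*k*(k+1)//2, k = n//35 (faster, asymptotic).


-- ===== PORT A =====
-- the while loop: state (s, i), runs while i ≤ n; fuel = remaining iteration count (n+1-i).toNat
def pvLoopA (n : Int) : Nat → Int → Int → Int
  | 0, s, _ => s
  | f + 1, s, i => pvLoopA n f (if PySem.Int.mod i 35 = 0 then s + i else s) (i + 1)

def specialSumExclusive (n : Int) : Int := pvLoopA n (n + 1).toNat 0 0

-- ===== PORT B =====
def specialSumExclusive_alt (n : Int) : Int :=
  if n < 0 then 0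
  else
    let k := PySem.Int.floordiv n 35
    PySem.Int.floordiv (35 * k * (k + 1)) 2

-- ===== PRECONDITION & SPEC =====
def Spec_specialSumExclusive (n : Int) (out : Int) : Prop := out = specialSumExclusive_alt n
instance (n : Int) (out : Int) : Decidable (Spec_specialSumExclusive n out) := by unfold Spec_specialSumExclusive; infer_instance

-- ===== CLAIM (what is proved, stated in full; the proofs are below) =====
def Claim_equal_specialSumExclusive : Prop := ∀ (n : Int), Dom_specialSumExclusive n → Spec_specialSumExclusive n (specialSumExclusive n)

-- ===== LEMMAS AND PROOFS =====

-- drop the last iteration: for i ≤ n the loop to n is the loop to n-1 plus n's contribution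
theorem pvLoopA_drop_last (k : Nat) : ∀ (n s i : Int), i ≤ n → (n - i).toNat = k →
    pvLoopA n ((n - i).toNat + 1) s i
      = pvLoopA (n - 1) (n - i).toNat s i + (if PySem.Int.mod n 35 = 0 then n else 0) := by
  induction k with
  | zero =>
    intro n s i hin hk
    have hi : i = n := by omega
    subst hi
    rw [hk]
    show (if PySem.Int.mod i 35 = 0 then s + i else s) = s + _
    split <;> omega
  | succ m ih =>
    intro n s i hin hk
    rw [hk]
    show pvLoopA n (m + 1) _ (i + 1) = pvLoopA (n - 1) m _ (i + 1) + _
    have h1 : (n - (i + 1)).toNat = m := by omega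
    have := ih n (if PySem.Int.mod i 35 = 0 then s + i else s) (i + 1) (by omega) h1
    rw [h1] at this
    exact this

-- closed form for the loop from 0, by induction on n
theorem pvLoopA_closed (k : Nat) : ∀ (n : Int), 0 ≤ n → n.toNat = k →
    pvLoopA n (n + 1).toNat 0 0 = specialSumExclusive_alt n := by
  induction k with
  | zero =>
    intro n hn hk
    have hn0 : n = 0 := by omega
    subst hn0
    decide
  | succ m ih =>
    intro n hn hk
    have h1 : (0:Int) ≤ n - 1 := by omega
    have hf : (n + 1).toNat = (n - 0).toNat + 1 := by omega
    have hf2 : (n - 0).toNat = (n - 1 + 1).toNat := by omega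
    rw [hf, pvLoopA_drop_last (n - 0).toNat n 0 0 hn rfl, hf2,
      ih (n - 1) h1 (by omega)]
    -- arithmetic: closed form at n equals closed form at n-1 plus n's contribution
    unfold specialSumExclusive_alt
    rw [if_neg (by omega : ¬ n < 0), if_neg (by omega : ¬ n - 1 < 0)]
    have h35 : (0:Int) < 35 := by norm_num
    have h2p : (0:Int) < 2 := by norm_num
    simp only [PySem.Int.floordiv_eq_ediv_of_pos h35, PySem.Int.mod_eq_emod_of_pos h35,
      PySem.Int.floordiv_eq_ediv_of_pos h2p]
    set q := n / 35 with hq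
    set q' := (n - 1) / 35 with hq'
    have hb : 35 * q ≤ n ∧ n < 35 * q + 35 := by
      have := Int.mul_ediv_add_emod n 35
      have := Int.emod_nonneg n (by norm_num : (35:Int) ≠ 0)
      have := Int.emod_lt_of_pos n h35
      omega
    have hb' : 35 * q' ≤ n - 1 ∧ n - 1 < 35 * q' + 35 := by
      have := Int.mul_ediv_add_emod (n - 1) 35
      have := Int.emod_nonneg (n - 1) (by norm_num : (35:Int) ≠ 0)
      have := Int.emod_lt_of_pos (n - 1) h35
      omega
    obtain ⟨e1, he1⟩ : Even (q * (q + 1)) := Int.even_mul_succ_self q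
    obtain ⟨e2, he2⟩ : Even (q' * (q' + 1)) := Int.even_mul_succ_self q'
    have hd1 : 35 * q * (q + 1) / 2 = 35 * e1 := by
      rw [mul_assoc, show q * (q + 1) = 2 * e1 by omega,
        show (35:Int) * (2 * e1) = 2 * (35 * e1) by ring,
        Int.mul_ediv_cancel_left _ (by norm_num)]
    have hd2 : 35 * q' * (q' + 1) / 2 = 35 * e2 := by
      rw [mul_assoc, show q' * (q' + 1) = 2 * e2 by omega,
        show (35:Int) * (2 * e2) = 2 * (35 * e2) by ring,
        Int.mul_ediv_cancel_left _ (by norm_num)]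
    rw [hd1, hd2]
    have hmod : n % 35 = n - 35 * q := by
      have := Int.mul_ediv_add_emod n 35
      omega
    by_cases hz : n % 35 = 0
    · -- n is a multiple of 35: q' = q - 1, contribution n = 35*q
      have hq'v : q' = q - 1 := by omega
      rw [if_pos hz]
      rw [hq'v] at he2
      have hr : q * (q + 1) = (q - 1) * ((q - 1) + 1) + 2 * q := by ring
      omega
    · -- otherwise q' = q, contribution 0
      have hq'v : q' = q := by omega
      rw [if_neg hz]
      rw [hq'v] at he2
      omega

-- ===== VERDICT (by name: the statement is the Claim_ definition above) =====
theorem specialSumExclusive_spec : Claim_equal_specialSumExclusive := by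
  intro n _
  unfold Spec_specialSumExclusive specialSumExclusive
  by_cases hn : 0 ≤ n
  · exact pvLoopA_closed n.toNat n hn rfl
  · rw [show (n + 1).toNat = 0 by omega]
    show (0:Int) = specialSumExclusive_alt n
    unfold specialSumExclusive_alt
    rw [if_pos (by omega)]
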